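-- pv_equiv track=rewrite | github.com/chungomovil/python | retomar/26_2.py | CalcularCadena
-- ===== SOURCE A (Python) =====
-- def CalcularCadena(lista):
--     mayor=lista[0]
--     for x in range(len(lista)):
--         if len(mayor)<len(lista[x]):
--             mayor=lista[x]
--         if x==len(lista)-1: #PARA RETORNAR EL QUE TENGA MENOR VALOR DE COMPONENTE
--             for y in range(len(lista)):
--                 if len(mayor)==len(lista[y]):
--                     if mayor<lista[y]:
--                         mayor=lista[y]
--     return mayor
-- ===== SOURCE B (Python) =====
-- def CalcularCadena(lista):
--     best = lista[0]
--     for s in lista: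
--         if (len(s), s) > (len(best), best):
--             best = s
--     return best
-- ===== Notes on version B (the rewrite author's own statement) =====
-- stated objective: simpler
-- what changed: A finds a longest string in one loop and then runs a second full scan (nested under a last-index test) to pick the lexicographically greatest of that length; B is a single pass keeping the maximum under the combined tuple key (len(s), s).
-- outside the precondition, e.g. on CalcularCadena([]): A raises IndexError, B raises IndexError
import Mathlib
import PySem

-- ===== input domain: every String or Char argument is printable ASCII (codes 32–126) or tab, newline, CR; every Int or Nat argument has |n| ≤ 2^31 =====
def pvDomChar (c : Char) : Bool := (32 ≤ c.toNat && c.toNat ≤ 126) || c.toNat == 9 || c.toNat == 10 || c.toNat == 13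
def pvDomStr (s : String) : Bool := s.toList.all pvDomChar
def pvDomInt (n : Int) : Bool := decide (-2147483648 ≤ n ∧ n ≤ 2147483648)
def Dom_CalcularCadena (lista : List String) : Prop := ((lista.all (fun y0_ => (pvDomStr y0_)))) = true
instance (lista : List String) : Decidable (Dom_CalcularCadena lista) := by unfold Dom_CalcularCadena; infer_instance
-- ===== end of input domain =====

-- B replaces A's two scans (find a longest string, then a second full scan for the
-- lexicographically greatest of that length) by a single pass keeping the maximum
-- under the combined key (length, string); objective: simpler one-pass decomposition.

-- ===== PORT A =====
-- inner tie-break loop of A: 'for y in range(len(lista)): …', run when x is the last index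
def CalcularCadenaInner (lista : List String) (mayor : String) : String :=
  (PySem.List.pyRange 0 (PySem.List.len lista) 1).foldl
    (fun m y =>
      if PySem.Str.len m = PySem.Str.len (PySem.List.pyGetD lista y "") then
        if m < PySem.List.pyGetD lista y "" then PySem.List.pyGetD lista y "" else m
      else m)
    mayor

def CalcularCadena (lista : List String) : String :=
  (PySem.List.pyRange 0 (PySem.List.len lista) 1).foldl
    (fun m x =>
      let m1 := if PySem.Str.len m < PySem.Str.len (PySem.List.pyGetD lista x "") then
                  PySem.List.pyGetD lista x "" else m
      if x = PySem.List.len lista - 1 then CalcularCadenaInner lista m1 else m1)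
    (PySem.List.pyGetD lista 0 "")

-- ===== PORT B =====
def CalcularCadena_alt (lista : List String) : String :=
  lista.foldl
    (fun best s =>
      if PySem.Str.len best < PySem.Str.len s ∨
         (PySem.Str.len best = PySem.Str.len s ∧ best < s) then s else best)
    (PySem.List.pyGetD lista 0 "")

-- ===== PRECONDITION & SPEC =====
-- Pre_ excludes only the empty list, on which A (lista[0]) raises IndexError.
def Pre_CalcularCadena (lista : List String) : Prop := lista ≠ []
instance (lista : List String) : Decidable (Pre_CalcularCadena lista) := by
  unfold Pre_CalcularCadena; infer_instance
def pvWitness_CalcularCadena : List String := ["ab", "cd", "e"]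

def Spec_CalcularCadena (lista : List String) (out : String) : Prop := out = CalcularCadena_alt lista
instance (lista : List String) (out : String) : Decidable (Spec_CalcularCadena lista out) := by unfold Spec_CalcularCadena; infer_instance

-- ===== CLAIM (what is proved, stated in full; the proofs are below) =====
def Claim_equal_CalcularCadena : Prop := ∀ (lista : List String), Dom_CalcularCadena lista → Pre_CalcularCadena lista → Spec_CalcularCadena lista (CalcularCadena lista)

-- ===== LEMMAS AND PROOFS =====

-- the key order: strictly longer, or same length and lexicographically ≤
def pvKLe (x y : String) : Prop := x.length < y.length ∨ (x.length = y.length ∧ x ≤ y)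

lemma pvKLe_trans {x y z : String} (h1 : pvKLe x y) (h2 : pvKLe y z) : pvKLe x z := by
  rcases h1 with h1 | ⟨e1, l1⟩ <;> rcases h2 with h2 | ⟨e2, l2⟩
  · exact Or.inl (by omega)
  · exact Or.inl (by omega)
  · exact Or.inl (by omega)
  · exact Or.inr ⟨by omega, le_trans l1 l2⟩

lemma pvKLe_antisymm {x y : String} (h1 : pvKLe x y) (h2 : pvKLe y x) : x = y := by
  rcases h1 with h1 | ⟨e1, l1⟩ <;> rcases h2 with h2 | ⟨e2, l2⟩ <;> first
  | omega
  | exact le_antisymm l1 l2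

-- the three loop bodies of the two ports, as pure step functions
def pvF1 (m s : String) : String :=
  if PySem.Str.len m < PySem.Str.len s then s else m
def pvF2 (m s : String) : String :=
  if PySem.Str.len m = PySem.Str.len s then (if m < s then s else m) else m
def pvG (m s : String) : String :=
  if PySem.Str.len m < PySem.Str.len s ∨ (PySem.Str.len m = PySem.Str.len s ∧ m < s) then s else m

lemma pvF1_step (a x : String) :
    a.length ≤ (pvF1 a x).length ∧ x.length ≤ (pvF1 a x).length ∧ (pvF1 a x = a ∨ pvF1 a x = x) := by
  unfold pvF1
  split
  · rename_i h
    rw [PySem.Str.len_eq, PySem.Str.len_eq] at h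
    exact ⟨le_of_lt (by exact_mod_cast h), le_refl _, Or.inr rfl⟩
  · rename_i h
    rw [PySem.Str.len_eq, PySem.Str.len_eq] at h
    exact ⟨le_refl _, by exact_mod_cast not_lt.mp h, Or.inl rfl⟩

-- properties of A's first loop: result is a member and has maximal length
lemma pvF1_spec (l : List String) (a : String) :
    (l.foldl pvF1 a) ∈ a :: l ∧ a.length ≤ (l.foldl pvF1 a).length ∧
      ∀ s ∈ l, s.length ≤ (l.foldl pvF1 a).length := by
  induction l generalizing a with
  | nil => simp
  | cons x t ih =>
    obtain ⟨hm, hlen, hall⟩ := ih (pvF1 a x)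
    obtain ⟨ka, kx, kmem⟩ := pvF1_step a x
    refine ⟨?_, le_trans ka (by simpa using hlen), ?_⟩
    · simp only [List.foldl_cons]
      rcases List.mem_cons.mp hm with h | h
      · rcases kmem with h' | h' <;> rw [h, h'] <;> simp
      · exact List.mem_cons_of_mem _ (List.mem_cons_of_mem _ h)
    · intro s hs
      rcases List.mem_cons.mp hs with h | h
      · rw [h]; exact le_trans kx (by simpa using hlen)
      · simpa using hall s h

lemma pvF2_step (m x : String) :
    (pvF2 m x).length = m.length ∧ m ≤ pvF2 m x ∧ (pvF2 m x = m ∨ pvF2 m x = x) ∧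
      (x.length = m.length → x ≤ pvF2 m x) := by
  unfold pvF2
  split
  · rename_i h
    rw [PySem.Str.len_eq, PySem.Str.len_eq] at h
    have hlen : m.length = x.length := by exact_mod_cast h
    split
    · rename_i h2
      exact ⟨hlen.symm, le_of_lt h2, Or.inr rfl, fun _ => le_refl _⟩
    · rename_i h2
      exact ⟨rfl, le_refl _, Or.inl rfl, fun _ => not_lt.mp h2⟩
  · rename_i h
    rw [PySem.Str.len_eq, PySem.Str.len_eq] at h
    have hne : ¬ x.length = m.length := fun he => h (by exact_mod_cast he.symm)
    exact ⟨rfl, le_refl _, Or.inl rfl, fun he => absurd he hne⟩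

-- properties of A's inner tie-break loop: keeps the length, only grows lexicographically,
-- and ends lexicographically above every same-length element
lemma pvF2_spec (l : List String) (m : String) :
    (l.foldl pvF2 m) ∈ m :: l ∧ (l.foldl pvF2 m).length = m.length ∧ m ≤ (l.foldl pvF2 m) ∧
      ∀ s ∈ l, s.length = m.length → s ≤ (l.foldl pvF2 m) := by
  induction l generalizing m with
  | nil => simp
  | cons x t ih =>
    obtain ⟨hm, hlen, hle, hall⟩ := ih (pvF2 m x)
    obtain ⟨kl, km, kmem, kx⟩ := pvF2_step m x
    refine ⟨?_, by simpa [kl] using hlen, le_trans km (by simpa using hle), ?_⟩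
    · simp only [List.foldl_cons]
      rcases List.mem_cons.mp hm with h | h
      · rcases kmem with h' | h' <;> rw [h, h'] <;> simp
      · exact List.mem_cons_of_mem _ (List.mem_cons_of_mem _ h)
    · intro s hs hsl
      rcases List.mem_cons.mp hs with h | h
      · subst h; exact le_trans (kx hsl) (by simpa using hle)
      · exact hall s h (by omega)

lemma pvG_step (a x : String) :
    pvKLe a (pvG a x) ∧ pvKLe x (pvG a x) ∧ (pvG a x = a ∨ pvG a x = x) := by
  unfold pvG
  split
  · rename_i h
    refine ⟨?_, Or.inr ⟨rfl, le_refl _⟩, Or.inr rfl⟩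
    rcases h with h | ⟨h1, h2⟩
    · rw [PySem.Str.len_eq, PySem.Str.len_eq] at h
      exact Or.inl (by exact_mod_cast h)
    · rw [PySem.Str.len_eq, PySem.Str.len_eq] at h1
      exact Or.inr ⟨by exact_mod_cast h1, le_of_lt h2⟩
  · rename_i h
    obtain ⟨h1, h2⟩ := not_or.mp h
    refine ⟨Or.inr ⟨rfl, le_refl _⟩, ?_, Or.inl rfl⟩
    rw [PySem.Str.len_eq, PySem.Str.len_eq] at h1
    have hle : x.length ≤ a.length := by exact_mod_cast not_lt.mp h1
    rcases lt_or_eq_of_le hle with hlt | heq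
    · exact Or.inl hlt
    · refine Or.inr ⟨heq, ?_⟩
      have hax : ¬ a < x := fun hax => h2
        ⟨by rw [PySem.Str.len_eq, PySem.Str.len_eq]; exact_mod_cast heq.symm, hax⟩
      exact not_lt.mp hax

-- properties of B's single pass: result is a member and a pvKLe-upper bound of the list
lemma pvG_spec (l : List String) (a : String) :
    (l.foldl pvG a) ∈ a :: l ∧ pvKLe a (l.foldl pvG a) ∧ ∀ s ∈ l, pvKLe s (l.foldl pvG a) := by
  induction l generalizing a with
  | nil => exact ⟨by simp, Or.inr ⟨rfl, le_refl _⟩, by simp⟩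
  | cons x t ih =>
    obtain ⟨hm, hinit, hall⟩ := ih (pvG a x)
    obtain ⟨ka, kx, kmem⟩ := pvG_step a x
    simp only [List.foldl_cons]
    refine ⟨?_, pvKLe_trans ka hinit, ?_⟩
    · rcases List.mem_cons.mp hm with h | h
      · rcases kmem with h' | h' <;> rw [h, h'] <;> simp
      · exact List.mem_cons_of_mem _ (List.mem_cons_of_mem _ h)
    · intro s hs
      rcases List.mem_cons.mp hs with h | h
      · subst h; exact pvKLe_trans kx hinit
      · exact hall s h

-- an index fold over a prefix of range(len) is a fold over the list prefix
lemma pvFoldl_range_take (xs : List String) (f : String → String → String) :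
    ∀ (k : Nat), k ≤ xs.length → ∀ (init : String),
    (PySem.List.pyRange 0 (k : Int) 1).foldl (fun m x => f m (PySem.List.pyGetD xs x "")) init
      = (xs.take k).foldl f init := by
  intro k
  induction k with
  | zero => intro _ init; simp
  | succ k ih =>
    intro hk init
    have h1 : ((k : Int) + 1) = ((k + 1 : Nat) : Int) := by push_cast; ring
    rw [← h1, PySem.List.pyRange_one_succ_right (by positivity), List.foldl_append]
    rw [ih (by omega) init]
    have hget : PySem.List.pyGetD xs (k : Int) "" = xs[k] := by
      rw [PySem.List.pyGetD_natCast]; exact List.getD_eq_getElem _ _ (by omega)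
    rw [List.take_add_one, List.getElem?_eq_getElem (by omega), List.foldl_append]
    simp only [List.foldl_cons, List.foldl_nil, Option.toList_some, hget]
    rfl

-- unfold A into: first loop over the whole list, then the inner loop over the whole list
lemma pvA_decomp (lista : List String) (hne : lista ≠ []) :
    CalcularCadena lista
      = lista.foldl pvF2 (lista.foldl pvF1 (PySem.List.pyGetD lista 0 "")) := by
  have hn : 1 ≤ lista.length := by
    cases lista with | nil => exact absurd rfl hne | cons h t => simp
  have hinner : ∀ m, CalcularCadenaInner lista m = lista.foldl pvF2 m := by
    intro m
    unfold CalcularCadenaInner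
    have := pvFoldl_range_take lista pvF2 lista.length (le_refl _) m
    simp only [List.take_length] at this
    rw [PySem.List.len_eq, ← this]
    rfl
  have htake : lista.take (lista.length - 1) ++ [lista[lista.length - 1]] = lista := by
    have h2 : lista[lista.length - 1]?.toList = [lista[lista.length - 1]] := by
      rw [List.getElem?_eq_getElem (by omega)]; rfl
    rw [← h2, ← List.take_add_one, Nat.sub_add_cancel hn, List.take_length]
  unfold CalcularCadena
  have hsplit : PySem.List.pyRange 0 (PySem.List.len lista) 1 =
      PySem.List.pyRange 0 ((lista.length - 1 : Nat) : Int) 1 ++ [((lista.length - 1 : Nat) : Int)] := by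
    rw [PySem.List.len_eq]
    have he : (lista.length : Int) = ((lista.length - 1 : Nat) : Int) + 1 := by push_cast [hn]; omega
    rw [he, PySem.List.pyRange_one_succ_right (by positivity)]
  rw [hsplit, List.foldl_append]
  have hpre : (PySem.List.pyRange 0 ((lista.length - 1 : Nat) : Int) 1).foldl
      (fun m x =>
        let m1 := if PySem.Str.len m < PySem.Str.len (PySem.List.pyGetD lista x "") then
                    PySem.List.pyGetD lista x "" else m
        if x = PySem.List.len lista - 1 then CalcularCadenaInner lista m1 else m1)
      (PySem.List.pyGetD lista 0 "")
      = (lista.take (lista.length - 1)).foldl pvF1 (PySem.List.pyGetD lista 0 "") := by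
    rw [← pvFoldl_range_take lista pvF1 (lista.length - 1) (by omega)]
    apply PySem.List.foldl_congr_mem
    intro acc x hx
    have hxlt : x < ((lista.length - 1 : Nat) : Int) := ((PySem.List.mem_pyRange_one).mp hx).2
    have hxne : ¬ (x = PySem.List.len lista - 1) := by
      rw [PySem.List.len_eq]; omega
    simp only [hxne, if_false, pvF1]
  rw [hpre]
  simp only [List.foldl_cons, List.foldl_nil]
  have hlast : (((lista.length - 1 : Nat) : Int) = PySem.List.len lista - 1) := by
    rw [PySem.List.len_eq]; omega
  rw [if_pos hlast, hinner]
  congr 1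
  have hget : PySem.List.pyGetD lista ((lista.length - 1 : Nat) : Int) "" = lista[lista.length - 1] := by
    rw [PySem.List.pyGetD_natCast]; exact List.getD_eq_getElem _ _ (by omega)
  have hfold : (lista.take (lista.length - 1) ++ [lista[lista.length - 1]]).foldl pvF1
        (PySem.List.pyGetD lista 0 "")
      = lista.foldl pvF1 (PySem.List.pyGetD lista 0 "") := by rw [htake]
  rw [← hfold, List.foldl_append]
  simp only [List.foldl_cons, List.foldl_nil, hget, pvF1]

lemma pvB_eq (lista : List String) :
    CalcularCadena_alt lista = lista.foldl pvG (PySem.List.pyGetD lista 0 "") := rfl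

-- ===== VERDICT (by name: the statement is the Claim_ definition above) =====
theorem CalcularCadena_spec : Claim_equal_CalcularCadena := by
  intro lista _ hne
  unfold Pre_CalcularCadena at hne
  unfold Spec_CalcularCadena
  rw [pvA_decomp lista hne, pvB_eq]
  have ha0 : PySem.List.pyGetD lista 0 "" ∈ lista := by
    cases lista with
    | nil => exact absurd rfl hne
    | cons h t => rw [PySem.List.pyGetD_zero_cons]; simp
  obtain ⟨hM_mem, _, hM_all⟩ := pvF1_spec lista (PySem.List.pyGetD lista 0 "")
  obtain ⟨hr_mem, hr_len, _, hr_all⟩ := pvF2_spec lista (lista.foldl pvF1 (PySem.List.pyGetD lista 0 ""))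
  obtain ⟨hb_mem, _, hb_all⟩ := pvG_spec lista (PySem.List.pyGetD lista 0 "")
  have hMmem : lista.foldl pvF1 (PySem.List.pyGetD lista 0 "") ∈ lista := by
    rcases List.mem_cons.mp hM_mem with h | h
    · rw [h]; exact ha0
    · exact h
  have hrmem : lista.foldl pvF2 (lista.foldl pvF1 (PySem.List.pyGetD lista 0 "")) ∈ lista := by
    rcases List.mem_cons.mp hr_mem with h | h
    · rw [h]; exact hMmem
    · exact h
  have hbmem : lista.foldl pvG (PySem.List.pyGetD lista 0 "") ∈ lista := by
    rcases List.mem_cons.mp hb_mem with h | h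
    · rw [h]; exact ha0
    · exact h
  have hub_r : ∀ s ∈ lista, pvKLe s (lista.foldl pvF2 (lista.foldl pvF1 (PySem.List.pyGetD lista 0 ""))) := by
    intro s hs
    have h1 : s.length ≤ (lista.foldl pvF1 (PySem.List.pyGetD lista 0 "")).length := hM_all s hs
    rcases lt_or_eq_of_le h1 with h | h
    · exact Or.inl (by omega)
    · exact Or.inr ⟨by omega, hr_all s hs h⟩
  exact pvKLe_antisymm (hb_all _ hrmem) (hub_r _ hbmem)
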